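-- pv_equiv track=rewrite | github.com/tovvmasyansergey/homework | function30.py | upper_1
-- ===== SOURCE A (Python) =====
-- def upper_1(mstr):
--         ml = ""
--         for i in mstr:
--                 if ord(i) > 96 and ord(i) < 122:
--                         ml += chr(ord(i) - 32)
--                 else:
--                         ml += i
--         return ml
-- ===== SOURCE B (Python) =====
-- def upper_1(mstr):
--     # divide and conquer: recursively split the string in half, transform each
--     # half, and concatenate; base case handles the empty/single-char string.
--     if len(mstr) <= 1:
--         if mstr and 96 < ord(mstr) < 122:
--             return chr(ord(mstr) - 32)
--         return mstr
--     mid = len(mstr) // 2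
--     return upper_1(mstr[:mid]) + upper_1(mstr[mid:])
-- ===== Notes on version B (the rewrite author's own statement) =====
-- stated objective: alternative
-- what changed: Replaces A's left-to-right loop with an if/else and repeated accumulator concatenation by a divide-and-conquer recursion that splits the string in half, converts each half recursively, and concatenates the results; single characters are handled at the base case.
import Mathlib
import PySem

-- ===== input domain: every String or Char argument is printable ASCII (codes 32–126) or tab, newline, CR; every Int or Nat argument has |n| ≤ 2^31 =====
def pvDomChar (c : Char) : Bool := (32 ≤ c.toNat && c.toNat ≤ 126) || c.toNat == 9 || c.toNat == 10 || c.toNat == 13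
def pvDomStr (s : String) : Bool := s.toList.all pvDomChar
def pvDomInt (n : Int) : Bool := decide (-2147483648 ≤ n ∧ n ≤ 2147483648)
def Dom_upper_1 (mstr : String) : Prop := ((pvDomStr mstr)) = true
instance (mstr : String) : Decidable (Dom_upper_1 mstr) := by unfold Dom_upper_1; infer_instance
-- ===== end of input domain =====

-- B replaces A's left-to-right loop (if/else + accumulator concatenation) with a
-- divide-and-conquer recursion: split in half, convert each half, concatenate.

-- ===== PORT A =====
-- literal port of A: iterate over the characters, appending the shifted char or the char itself
def upper_1 (mstr : String) : String :=
  String.ofList (mstr.toList.foldl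
    (fun ml i =>
      if 96 < i.toNat ∧ i.toNat < 122 then ml ++ [Char.ofNat (i.toNat - 32)]
      else ml ++ [i]) [])

-- ===== PORT B =====
-- divide-and-conquer recursion of Source B, on the character list
def pvConv_upper_1 (l : List Char) : List Char :=
  if h : l.length ≤ 1 then
    match l with
    | [] => []
    | c :: _ => if 96 < c.toNat ∧ c.toNat < 122 then [Char.ofNat (c.toNat - 32)] else [c]
  else
    pvConv_upper_1 (l.take (l.length / 2)) ++ pvConv_upper_1 (l.drop (l.length / 2))
termination_by l.length
decreasing_by
  · simp only [List.length_take]; omega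
  · simp only [List.length_drop]; omega

def upper_1_alt (mstr : String) : String :=
  String.ofList (pvConv_upper_1 mstr.toList)

-- ===== PRECONDITION & SPEC =====
def Spec_upper_1 (mstr : String) (out : String) : Prop := out = upper_1_alt mstr
instance (mstr : String) (out : String) : Decidable (Spec_upper_1 mstr out) := by unfold Spec_upper_1; infer_instance

-- ===== CLAIM (what is proved, stated in full; the proofs are below) =====
def Claim_equal_upper_1 : Prop := ∀ (mstr : String), Dom_upper_1 mstr → Spec_upper_1 mstr (upper_1 mstr)

-- ===== LEMMAS AND PROOFS =====

def pvF_upper_1 (i : Char) : Char :=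
  if 96 < i.toNat ∧ i.toNat < 122 then Char.ofNat (i.toNat - 32) else i

lemma upper_1_foldl_eq_map (l acc : List Char) :
    l.foldl (fun ml i =>
      if 96 < i.toNat ∧ i.toNat < 122 then ml ++ [Char.ofNat (i.toNat - 32)]
      else ml ++ [i]) acc
    = acc ++ l.map pvF_upper_1 := by
  induction l generalizing acc with
  | nil => simp
  | cons x xs ih =>
    simp only [List.foldl_cons, List.map_cons, pvF_upper_1]
    by_cases h : 96 < x.toNat ∧ x.toNat < 122
    · rw [if_pos h, if_pos h, ih]; simp
    · rw [if_neg h, if_neg h, ih]; simp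

lemma pvConv_eq_map : ∀ (n : Nat) (l : List Char), l.length = n →
    pvConv_upper_1 l = l.map pvF_upper_1 := by
  intro n
  induction n using Nat.strong_induction_on with
  | _ n ih =>
    intro l hl
    rw [pvConv_upper_1]
    by_cases h : l.length ≤ 1
    · rw [dif_pos h]
      match l with
      | [] => simp
      | [c] => simp only [List.map_cons, List.map_nil, pvF_upper_1]; split_ifs <;> rfl
      | a :: b :: t => simp at h
    · rw [dif_neg h]
      have h2 : 2 ≤ l.length := by omega
      rw [ih (l.take (l.length / 2)).length (by simp; omega) _ rfl,
          ih (l.drop (l.length / 2)).length (by simp; omega) _ rfl,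
          ← List.map_append, List.take_append_drop]

-- ===== VERDICT (by name: the statement is the Claim_ definition above) =====
theorem upper_1_spec : Claim_equal_upper_1 := by
  intro mstr _
  unfold Spec_upper_1 upper_1 upper_1_alt
  rw [upper_1_foldl_eq_map, pvConv_eq_map _ _ rfl, List.nil_append]
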